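-- pv_equiv track=rewrite | github.com/thatAverageGuy/TinyLM | tokenizer/bpe/naive_bpe.py | char_spaced_word_freq
-- ===== SOURCE A (Python) =====
-- import string
-- from functools import reduce
-- from collections import defaultdict, Counter
--
-- def char_spaced_word_freq(raw_text):
--     """Convert raw text into character-spaced word frequency dict with </w> boundary markers and handle any punctuation as an indvidual word"""
--     raw_text = reduce(lambda text, punc: text.replace(punc, f" {punc} "), string.punctuation, raw_text)
--     words = []
--     s = ''
--     for char in raw_text:
--         if char == ' ':
--             s += '</w>'
--             words.append(s)
--             s = ''
--         else:
--             s += char + ' '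
--     s += '</w>'
--     words.append(s)
--     freq = Counter(words)
--     return dict(freq)
-- ===== SOURCE B (Python) =====
-- import string
-- from collections import Counter
--
-- _PUNCT = frozenset(string.punctuation)
--
-- def char_spaced_word_freq(raw_text):
--     """Single fused scan: no replace passes, no split; tokenize directly, count, format distinct tokens once."""
--     tokens = []
--     cur = []
--     for ch in raw_text:
--         if ch == ' ':
--             tokens.append(''.join(cur))
--             cur = []
--         elif ch in _PUNCT:
--             # replacing ch with " ch " then splitting on ' ' yields: end current token,
--             # the punctuation as its own token, and a fresh (possibly empty) token after it
--             tokens.append(''.join(cur))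
--             tokens.append(ch)
--             cur = []
--         else:
--             cur.append(ch)
--     tokens.append(''.join(cur))
--     counts = Counter(tokens)
--     return {''.join(c + ' ' for c in tok) + '</w>': n for tok, n in counts.items()}
-- ===== Notes on version B (the rewrite author's own statement) =====
-- stated objective: alternative
-- what changed: B drops A's 32 sequential full-text punctuation replace passes and subsequent character rescan in favour of a single fused scan of the raw text that tokenizes directly (space ends a token; a punctuation char ends the token, is its own token, and opens a fresh one), counts the raw tokens, and formats each distinct token only once into its char-spaced </w>-marked key.
import Mathlib
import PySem

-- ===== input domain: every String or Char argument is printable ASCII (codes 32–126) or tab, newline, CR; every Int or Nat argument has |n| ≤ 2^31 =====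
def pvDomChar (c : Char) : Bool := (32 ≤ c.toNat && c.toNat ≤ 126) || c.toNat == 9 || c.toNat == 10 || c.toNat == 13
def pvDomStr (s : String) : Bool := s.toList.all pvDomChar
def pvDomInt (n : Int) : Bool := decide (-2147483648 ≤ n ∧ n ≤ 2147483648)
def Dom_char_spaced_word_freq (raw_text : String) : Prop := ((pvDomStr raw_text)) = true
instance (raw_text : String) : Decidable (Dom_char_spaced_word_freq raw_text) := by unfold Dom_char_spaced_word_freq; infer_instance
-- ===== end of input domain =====

-- B replaces A's 32 full-text punctuation replace passes + character rescan by ONE fused scan of the raw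
-- text that tokenizes directly (punctuation handled inline), counts raw tokens, and formats each distinct
-- token once; objective: alternative decomposition.

def pvPunct : List Char := "!\"#$%&'()*+,-./:;<=>?@[\\]^_`{|}~".toList
def pvEndW : List Char := ['<', '/', 'w', '>']

-- ===== PORT A =====
-- A's reduce of replaces: string.punctuation folded over the text
def pvNormalize (cs : List Char) : List Char :=
  pvPunct.foldl (fun t p => PySem.Chars.replace t [p] [' ', p, ' ']) cs

-- A's character loop: accumulator s, output list words
def pvALoop : List Char → List Char → List (List Char) → List (List Char)
  | [], s, words => words ++ [s ++ pvEndW]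
  | c :: rest, s, words =>
    if c = ' ' then pvALoop rest [] (words ++ [s ++ pvEndW])
    else pvALoop rest (s ++ [c, ' ']) words

def char_spaced_word_freq (raw_text : String) : List (String × Int) :=
  let t := pvNormalize raw_text.toList
  let words := pvALoop t [] []
  ((PySem.Dict.counter words).items).map (fun p => (String.ofList p.1, p.2))

-- ===== PORT B =====
-- Source B's single scan over the raw characters: cur accumulator, emitted token list
def pvScan : List Char → List Char → List (List Char)
  | [], cur => [cur]
  | c :: rest, cur =>
    if c = ' ' then cur :: pvScan rest []
    else if c ∈ pvPunct then cur :: [c] :: pvScan rest []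
    else pvScan rest (cur ++ [c])

-- ''.join(c + ' ' for c in tok) + '</w>'
def pvFmt (tok : List Char) : List Char :=
  PySem.Chars.join [] (tok.map (fun c => [c, ' '])) ++ pvEndW

def char_spaced_word_freq_alt (raw_text : String) : List (String × Int) :=
  let counts := PySem.Dict.counter (pvScan raw_text.toList [])
  counts.items.map (fun p => (String.ofList (pvFmt p.1), p.2))

-- ===== PRECONDITION & SPEC =====
def Spec_char_spaced_word_freq (raw_text : String) (out : List (String × Int)) : Prop := out = char_spaced_word_freq_alt raw_text
instance (raw_text : String) (out : List (String × Int)) : Decidable (Spec_char_spaced_word_freq raw_text out) := by unfold Spec_char_spaced_word_freq; infer_instance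

-- ===== CLAIM (what is proved, stated in full; the proofs are below) =====
def Claim_equal_char_spaced_word_freq : Prop := ∀ (raw_text : String), Dom_char_spaced_word_freq raw_text → Spec_char_spaced_word_freq raw_text (char_spaced_word_freq raw_text)

-- ===== LEMMAS AND PROOFS =====

-- s.split(' ') on the normalized text (proof-only intermediate: A's word list and B's token list both equal it)
def pvSplitSpace : List Char → List (List Char)
  | [] => [[]]
  | c :: rest =>
    if c = ' ' then [] :: pvSplitSpace rest
    else
      match pvSplitSpace rest with
      | [] => [[c]]
      | t :: ts => (c :: t) :: ts

-- the flattened form of pvFmt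
def pvFmtF (tok : List Char) : List Char := tok.flatMap (fun c => [c, ' ']) ++ pvEndW

-- character-wise expansion of the normalization w.r.t. a processed-punctuation set P
def pvExpand (P : List Char) (cs : List Char) : List Char :=
  cs.flatMap (fun c => if c ∈ P then [' ', c, ' '] else [c])

theorem pvFmt_eq (tok : List Char) : pvFmt tok = pvFmtF tok := by
  unfold pvFmt pvFmtF
  simp only [PySem.Chars.join, List.flatMap]
  induction tok with
  | nil => rfl
  | cons c t ih =>
    cases t <;> simp_all [List.intercalate]

-- single-character replace is a flatMap
theorem pvReplaceGo_single (p : Char) (r : List Char) :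
    ∀ (l : List Char) (fuel : Nat) (acc : List Char), l.length ≤ fuel →
      PySem.Chars.replace.go [p] r fuel l acc =
        acc.reverse ++ l.flatMap (fun c => if c = p then r else [c]) := by
  intro l
  induction l with
  | nil => intro fuel acc _; cases fuel <;> simp [PySem.Chars.replace.go]
  | cons c t ih =>
    intro fuel acc h
    cases fuel with
    | zero => simp at h
    | succ f =>
      by_cases hc : c = p
      · subst hc
        have hpre : List.isPrefixOf [c] (c :: t) = true := by
          simp [List.isPrefixOf]
        simp only [PySem.Chars.replace.go, hpre, List.length_cons] at *
        simp [ih f (r.reverse ++ acc) (by omega)]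
      · have hpre : List.isPrefixOf [p] (c :: t) = false := by
          simp [List.isPrefixOf]; exact fun hh => absurd hh.symm hc
        simp only [PySem.Chars.replace.go, hpre, Bool.false_eq_true, if_false,
          List.length_cons] at *
        rw [ih f (c :: acc) (by omega)]
        simp [hc]

theorem pvReplace_single (l : List Char) (p : Char) (r : List Char) :
    PySem.Chars.replace l [p] r = l.flatMap (fun c => if c = p then r else [c]) := by
  unfold PySem.Chars.replace
  simp only [List.isEmpty_cons, Bool.false_eq_true, if_false]
  simpa using pvReplaceGo_single p r l l.length [] (le_refl _)

-- one replace step extends the processed set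
theorem pvExpand_step (cs : List Char) (P : List Char) (p : Char)
    (hp : p ∉ P) (hsp : p ≠ ' ') :
    PySem.Chars.replace (pvExpand P cs) [p] [' ', p, ' '] = pvExpand (P ++ [p]) cs := by
  rw [pvReplace_single]
  unfold pvExpand
  rw [List.flatMap_assoc]
  refine List.flatMap_congr (fun c _ => ?_)
  by_cases hcP : c ∈ P
  · have hcp : c ≠ p := fun h => hp (h ▸ hcP)
    simp [hcP, hcp, hsp.symm, List.mem_append]
  · by_cases hcp : c = p
    · subst hcp; simp [hcP]
    · simp [hcP, hcp, List.mem_append]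

theorem pvNormalize_fold (cs : List Char) :
    ∀ (ps : List Char) (P : List Char), ps.Nodup → (∀ q ∈ ps, q ∉ P ∧ q ≠ ' ') →
      ps.foldl (fun t p => PySem.Chars.replace t [p] [' ', p, ' ']) (pvExpand P cs) =
        pvExpand (P ++ ps) cs := by
  intro ps
  induction ps with
  | nil => intro P _ _; simp
  | cons p rest ih =>
    intro P hnd hq
    obtain ⟨hpP, hps⟩ := hq p (by simp)
    simp only [List.foldl_cons]
    rw [pvExpand_step cs P p hpP hps]
    rw [ih (P ++ [p]) hnd.of_cons (fun q hqr => by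
      refine ⟨?_, (hq q (by simp [hqr])).2⟩
      simp only [List.mem_append, List.mem_singleton]
      rintro (h1 | rfl)
      · exact (hq q (by simp [hqr])).1 h1
      · exact (List.nodup_cons.mp hnd).1 hqr)]
    simp

theorem pvNormalize_eq (cs : List Char) : pvNormalize cs = pvExpand pvPunct cs := by
  have h := pvNormalize_fold cs pvPunct [] (by decide) (fun q hq => ⟨by simp, by
    rintro rfl; revert hq; decide⟩)
  simpa [pvExpand, pvNormalize] using h

theorem pvSplitSpace_ne_nil (cs : List Char) : pvSplitSpace cs ≠ [] := by
  cases cs with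
  | nil => simp [pvSplitSpace]
  | cons c rest =>
    unfold pvSplitSpace
    split
    · simp
    · split <;> simp

-- B's fused scan equals split(' ') of the expanded text
theorem pvScan_eq_split (cs : List Char) : ∀ (cur : List Char) (t : List Char) (ts : List (List Char)),
    pvSplitSpace (pvExpand pvPunct cs) = t :: ts → pvScan cs cur = (cur ++ t) :: ts := by
  induction cs with
  | nil =>
    intro cur t ts h
    simp only [pvExpand, List.flatMap_nil, pvSplitSpace] at h
    injection h with h1 h2; subst h1; subst h2
    simp [pvScan]
  | cons c rest ih =>
    intro cur t ts h
    have hrest : ∃ t2 ts2, pvSplitSpace (pvExpand pvPunct rest) = t2 :: ts2 := by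
      cases hr : pvSplitSpace (pvExpand pvPunct rest) with
      | nil => exact absurd hr (pvSplitSpace_ne_nil _)
      | cons a b => exact ⟨a, b, rfl⟩
    obtain ⟨t2, ts2, hr⟩ := hrest
    by_cases hsp : c = ' '
    · subst hsp
      have he : pvExpand pvPunct (' ' :: rest) = ' ' :: pvExpand pvPunct rest := by
        simp [pvExpand, (by decide : ' ' ∉ pvPunct)]
      rw [he] at h
      rw [show pvSplitSpace (' ' :: pvExpand pvPunct rest) = [] :: pvSplitSpace (pvExpand pvPunct rest) from by simp [pvSplitSpace]] at h
      injection h with h1 h2; subst h1; subst h2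
      rw [show pvScan (' ' :: rest) cur = cur :: pvScan rest [] from by simp [pvScan]]
      rw [ih [] t2 ts2 hr, hr]
      simp
    · by_cases hpc : c ∈ pvPunct
      · have hce : c ≠ ' ' := hsp
        have he : pvExpand pvPunct (c :: rest) = ' ' :: c :: ' ' :: pvExpand pvPunct rest := by
          simp [pvExpand, hpc]
        rw [he] at h
        rw [show pvSplitSpace (' ' :: c :: ' ' :: pvExpand pvPunct rest) =
              [] :: [c] :: pvSplitSpace (pvExpand pvPunct rest) from by
          simp [pvSplitSpace, hce]] at h
        injection h with h1 h2; subst h1; subst h2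
        rw [show pvScan (c :: rest) cur = cur :: [c] :: pvScan rest [] from by
          simp [pvScan, hsp, hpc]]
        rw [ih [] t2 ts2 hr, hr]
        simp
      · have he : pvExpand pvPunct (c :: rest) = c :: pvExpand pvPunct rest := by
          simp [pvExpand, hpc]
        rw [he] at h
        simp only [pvSplitSpace, if_neg hsp, hr] at h
        injection h with h1 h2; subst h1; subst h2
        rw [show pvScan (c :: rest) cur = pvScan rest (cur ++ [c]) from by
          simp [pvScan, hsp, hpc]]
        rw [ih (cur ++ [c]) t2 ts2 hr]
        simp
theorem pvScan_split (cs : List Char) : pvScan cs [] = pvSplitSpace (pvNormalize cs) := by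
  rw [pvNormalize_eq]
  cases hr : pvSplitSpace (pvExpand pvPunct cs) with
  | nil => exact absurd hr (pvSplitSpace_ne_nil _)
  | cons t ts => rw [pvScan_eq_split cs [] t ts hr]; simp

-- A's manual loop equals split(' ') followed by formatting every word
theorem pvALoop_eq (cs : List Char) : ∀ (s : List Char) (words : List (List Char))
    (t : List Char) (ts : List (List Char)), pvSplitSpace cs = t :: ts →
    pvALoop cs s words = words ++ (s ++ pvFmtF t) :: ts.map pvFmtF := by
  induction cs with
  | nil =>
    intro s words t ts h
    unfold pvSplitSpace at h
    injection h with h1 h2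
    subst h1; subst h2
    simp [pvALoop, pvFmtF]
  | cons c rest ih =>
    intro s words t ts h
    by_cases hc : c = ' '
    · subst hc
      rw [show pvSplitSpace (' ' :: rest) = [] :: pvSplitSpace rest from by
        simp [pvSplitSpace]] at h
      injection h with h1 h2
      subst h1; subst h2
      obtain ⟨t2, ts2, h2⟩ : ∃ t2 ts2, pvSplitSpace rest = t2 :: ts2 := by
        cases hr : pvSplitSpace rest with
        | nil => exact absurd hr (pvSplitSpace_ne_nil rest)
        | cons a b => exact ⟨a, b, rfl⟩
      rw [show pvALoop (' ' :: rest) s words = pvALoop rest [] (words ++ [s ++ pvEndW]) from by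
        simp [pvALoop]]
      rw [ih [] (words ++ [s ++ pvEndW]) t2 ts2 h2, h2]
      simp [pvFmtF]
    · rw [show pvALoop (c :: rest) s words = pvALoop rest (s ++ [c, ' ']) words from by
        simp [pvALoop, hc]]
      simp only [pvSplitSpace, if_neg hc] at h
      cases hr : pvSplitSpace rest with
      | nil => exact absurd hr (pvSplitSpace_ne_nil rest)
      | cons t2 ts2 =>
        rw [hr] at h
        injection h with h1 h2
        subst h1; subst h2
        rw [ih (s ++ [c, ' ']) words t2 ts2 hr]
        simp [pvFmtF]

theorem pvWords_eq (cs : List Char) : pvALoop cs [] [] = (pvSplitSpace cs).map pvFmtF := by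
  cases hr : pvSplitSpace cs with
  | nil => exact absurd hr (pvSplitSpace_ne_nil cs)
  | cons t ts => rw [pvALoop_eq cs [] [] t ts hr]; simp

theorem pvFlatTwo_inj : Function.Injective (fun cs : List Char => cs.flatMap (fun c => [c, ' '])) := by
  intro a b h
  induction a generalizing b with
  | nil => cases b with
    | nil => rfl
    | cons c t => simp at h
  | cons c t ih =>
    cases b with
    | nil => simp at h
    | cons c' t' =>
      simp only [List.flatMap_cons, List.cons_append, List.nil_append, List.cons.injEq] at h
      obtain ⟨rfl, _, h2⟩ := h
      exact congrArg _ (ih h2)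

theorem pvFmtF_inj : Function.Injective pvFmtF := by
  intro a b h
  unfold pvFmtF at h
  exact pvFlatTwo_inj (List.append_cancel_right h)

theorem pvSet_ofList_map {f : List Char → List Char} (hf : Function.Injective f)
    (l : List (List Char)) :
    PySem.Set.ofList (l.map f) = (PySem.Set.ofList l).map f := by
  have key : ∀ (l acc : List (List Char)),
      List.foldl PySem.Set.add (acc.map f) (l.map f) =
        (List.foldl PySem.Set.add acc l).map f := by
    intro l
    induction l with
    | nil => intro acc; rfl
    | cons x t ih =>
      intro acc
      simp only [List.map_cons, List.foldl_cons]
      have hadd : PySem.Set.add (acc.map f) (f x) = (PySem.Set.add acc x).map f := by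
        unfold PySem.Set.add
        have hco : PySem.Set.contains (acc.map f) (f x) = PySem.Set.contains acc x := by
          simp [PySem.Set.contains, List.mem_map_of_injective hf]
        rw [hco]
        split <;> simp
      rw [hadd, ih]
  simpa [PySem.Set.ofList, PySem.Set.empty] using key l []

theorem pvMain (cs : List Char) :
    ((PySem.Dict.counter (pvALoop cs [] [])).items).map (fun p => (String.ofList p.1, p.2)) =
      ((PySem.Dict.counter (pvSplitSpace cs)).items).map (fun p => (String.ofList (pvFmt p.1), p.2)) := by
  rw [pvWords_eq]
  rw [PySem.Dict.items_counter, PySem.Dict.items_counter]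
  rw [pvSet_ofList_map pvFmtF_inj]
  simp only [List.map_map]
  refine List.map_congr_left (fun tok _ => ?_)
  simp only [Function.comp]
  rw [pvFmt_eq]
  rw [List.count_map_of_injective _ pvFmtF pvFmtF_inj]

-- ===== VERDICT (by name: the statement is the Claim_ definition above) =====
theorem char_spaced_word_freq_spec : Claim_equal_char_spaced_word_freq := by
  intro raw_text _
  show _ = _
  unfold char_spaced_word_freq char_spaced_word_freq_alt
  rw [pvScan_split]
  exact pvMain (pvNormalize raw_text.toList)
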